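-- pv_equiv track=rewrite | github.com/Vegas30/Python | HomeWork/HW31/hw31.py | group_by_type
-- ===== SOURCE A (Python) =====
-- def group_by_type(str):
--     group = {'letters': '', 'digits': '', 'specials': ''}
--     for char in str:
--         if char.isalpha():
--             group['letters'] += char
--         elif char.isdigit():
--             group['digits'] += char
--         else:
--             group['specials'] += char
--     return group
-- ===== SOURCE B (Python) =====
-- def group_by_type(str):
--     letters = ''.join(c for c in str if c.isalpha())
--     digits = ''.join(c for c in str if not c.isalpha() and c.isdigit())
--     specials = ''.join(c for c in str if not c.isalpha() and not c.isdigit())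
--     return {'letters': letters, 'digits': digits, 'specials': specials}
-- ===== Notes on version B (the rewrite author's own statement) =====
-- stated objective: idiomatic
-- what changed: Replaced the single if/elif/else classifying loop that appends into a pre-seeded dict via repeated string += with three independent filtered str.join passes, one per group.
import Mathlib
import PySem

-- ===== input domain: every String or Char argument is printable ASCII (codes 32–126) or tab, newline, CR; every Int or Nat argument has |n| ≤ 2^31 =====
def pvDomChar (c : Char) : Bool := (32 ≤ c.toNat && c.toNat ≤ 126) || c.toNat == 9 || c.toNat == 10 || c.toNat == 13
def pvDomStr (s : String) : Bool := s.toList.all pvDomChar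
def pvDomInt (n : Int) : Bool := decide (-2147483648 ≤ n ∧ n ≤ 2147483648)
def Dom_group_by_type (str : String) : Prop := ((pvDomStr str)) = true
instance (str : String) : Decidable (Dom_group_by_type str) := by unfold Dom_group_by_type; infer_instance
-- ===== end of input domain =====

-- B replaces A's single if/elif/else classifying loop with three independent filtered passes (idiomatic).

-- ===== PORT A =====
-- accumulated group strings are held as List Char and turned into String only at return (exact: '+=' on str is append)
def gbtLoop (cs : List Char) (d : PySem.Dict String (List Char)) : PySem.Dict String (List Char) :=
  cs.foldl (fun d char =>
    if PySem.Chars.isalpha char then d.modify "letters" [] (· ++ [char])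
    else if PySem.Chars.isdigit char then d.modify "digits" [] (· ++ [char])
    else d.modify "specials" [] (· ++ [char])) d

def group_by_type (str : String) : List (String × String) :=
  (gbtLoop str.toList
    (PySem.Dict.ofList [("letters", ([] : List Char)), ("digits", []), ("specials", [])])).items.map
    (fun p => (p.1, String.mk p.2))

-- ===== PORT B =====
def group_by_type_alt (str : String) : List (String × String) :=
  [("letters", String.mk (str.toList.filter (fun c => PySem.Chars.isalpha c))),
   ("digits", String.mk (str.toList.filter (fun c => !PySem.Chars.isalpha c && PySem.Chars.isdigit c))),
   ("specials", String.mk (str.toList.filter (fun c => !PySem.Chars.isalpha c && !PySem.Chars.isdigit c)))]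

-- ===== PRECONDITION & SPEC =====
def Spec_group_by_type (str : String) (out : List (String × String)) : Prop := out = group_by_type_alt str
instance (str : String) (out : List (String × String)) : Decidable (Spec_group_by_type str out) := by unfold Spec_group_by_type; infer_instance

-- ===== CLAIM (what is proved, stated in full; the proofs are below) =====
def Claim_equal_group_by_type : Prop := ∀ (str : String), Dom_group_by_type str → Spec_group_by_type str (group_by_type str)

-- ===== LEMMAS AND PROOFS =====
theorem gbtLoop_inv (cs : List Char) (a b c : List Char) :
    gbtLoop cs (PySem.Dict.mk [("letters", a), ("digits", b), ("specials", c)]) =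
      PySem.Dict.mk
        [("letters", a ++ cs.filter (fun x => PySem.Chars.isalpha x)),
         ("digits", b ++ cs.filter (fun x => !PySem.Chars.isalpha x && PySem.Chars.isdigit x)),
         ("specials", c ++ cs.filter (fun x => !PySem.Chars.isalpha x && !PySem.Chars.isdigit x))] := by
  induction cs generalizing a b c with
  | nil => simp [gbtLoop]
  | cons x xs ih =>
    by_cases h1 : PySem.Chars.isalpha x
    · simp only [gbtLoop, List.foldl_cons, h1, if_true, List.filter_cons]
      have : (PySem.Dict.mk [("letters", a), ("digits", b), ("specials", c)]).modify "letters" [] (· ++ [x]) =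
          PySem.Dict.mk [("letters", a ++ [x]), ("digits", b), ("specials", c)] := by rfl
      rw [this]
      simpa [gbtLoop, h1] using ih (a ++ [x]) b c
    · by_cases h2 : PySem.Chars.isdigit x
      · simp only [gbtLoop, List.foldl_cons, h1, h2, if_false, if_true, List.filter_cons]
        have : (PySem.Dict.mk [("letters", a), ("digits", b), ("specials", c)]).modify "digits" [] (· ++ [x]) =
            PySem.Dict.mk [("letters", a), ("digits", b ++ [x]), ("specials", c)] := by rfl
        rw [this]
        simpa [gbtLoop, h1, h2] using ih a (b ++ [x]) c
      · simp only [gbtLoop, List.foldl_cons, h1, h2, if_false, List.filter_cons]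
        have : (PySem.Dict.mk [("letters", a), ("digits", b), ("specials", c)]).modify "specials" [] (· ++ [x]) =
            PySem.Dict.mk [("letters", a), ("digits", b), ("specials", c ++ [x])] := by rfl
        rw [this]
        simpa [gbtLoop, h1, h2] using ih a b (c ++ [x])

-- ===== VERDICT (by name: the statement is the Claim_ definition above) =====
theorem group_by_type_spec : Claim_equal_group_by_type := by
  intro s _
  unfold Spec_group_by_type group_by_type group_by_type_alt
  have e : PySem.Dict.ofList [("letters", ([] : List Char)), ("digits", []), ("specials", [])] =
      PySem.Dict.mk [("letters", []), ("digits", []), ("specials", [])] := rfl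
  rw [e, gbtLoop_inv s.toList [] [] []]
  simp [PySem.Dict.items]
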